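-- pv_equiv track=rewrite | github.com/MKurthen/PECode | PE89.py | ReplaceWithHigherDigitsRule
-- ===== SOURCE A (Python) =====
-- def ReplaceWithHigherDigitsRule(InputNumber): #changes one occurence of unnecassary digits, returns New Number, returns Input if no such occurence found
-- 	for i in range(len(InputNumber)):
-- 		if i >= 1 and (InputNumber[i] == InputNumber[i-1]):
-- 			#two V's to one X
-- 			if InputNumber[i] == 'V':
-- 				OutputNumber = InputNumber[:(i-1)] + 'X' + InputNumber[(i+1):]
-- 				break
-- 			#two L's to one C
-- 			if InputNumber[i] == 'L':
-- 				OutputNumber = InputNumber[:(i-1)] + 'C' + InputNumber[(i+1):]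
-- 				break
-- 			#two D's to one M
-- 			if InputNumber[i] == 'D':
-- 				OutputNumber = InputNumber[:(i-1)] + 'M' + InputNumber[(i+1):]
-- 				break
-- 		if i >= 4 and (InputNumber[i] == InputNumber[i-1] == InputNumber[i-2] == InputNumber[i-3] == InputNumber[i-4]):
-- 			#five I's to one V
-- 			if InputNumber[i] == 'I':
-- 				OutputNumber = InputNumber[:(i-4)] + 'V' + InputNumber[(i+1):]
-- 				break
-- 			#five X's to one L
-- 			if InputNumber[i] == 'X':
-- 				OutputNumber = InputNumber[:(i-4)] + 'L' + InputNumber[(i+1):]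
-- 				break
-- 			# five C's to one D
-- 			if InputNumber[i] == 'C':
-- 				OutputNumber = InputNumber[:(i-4)] + 'D' + InputNumber[(i+1):]
-- 				break
-- 		if i == len(InputNumber)-1:
-- 			OutputNumber = InputNumber
-- 			break
-- 	return OutputNumber
-- ===== SOURCE B (Python) =====
-- def ReplaceWithHigherDigitsRule(InputNumber):
--     # leftmost occurrence of any collapsible pattern, found via str.find
--     best = None
--     for pat, rep in (('VV', 'X'), ('LL', 'C'), ('DD', 'M'),
--                      ('IIIII', 'V'), ('XXXXX', 'L'), ('CCCCC', 'D')):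
--         p = InputNumber.find(pat)
--         if p >= 0 and (best is None or p < best[0]):
--             best = (p, pat, rep)
--     if best is None:
--         return InputNumber
--     p, pat, rep = best
--     return InputNumber[:p] + rep + InputNumber[p + len(pat):]
-- ===== Notes on version B (the rewrite author's own statement) =====
-- stated objective: idiomatic
-- what changed: A scans every index in Python and fires on the first repeated-digit trigger (pair of V/L/D, or run of five I/X/C) it reaches; B instead calls str.find once per collapsible pattern and rewrites at the leftmost found occurrence, with no index scan or character-chain comparisons.
import Mathlib
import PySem

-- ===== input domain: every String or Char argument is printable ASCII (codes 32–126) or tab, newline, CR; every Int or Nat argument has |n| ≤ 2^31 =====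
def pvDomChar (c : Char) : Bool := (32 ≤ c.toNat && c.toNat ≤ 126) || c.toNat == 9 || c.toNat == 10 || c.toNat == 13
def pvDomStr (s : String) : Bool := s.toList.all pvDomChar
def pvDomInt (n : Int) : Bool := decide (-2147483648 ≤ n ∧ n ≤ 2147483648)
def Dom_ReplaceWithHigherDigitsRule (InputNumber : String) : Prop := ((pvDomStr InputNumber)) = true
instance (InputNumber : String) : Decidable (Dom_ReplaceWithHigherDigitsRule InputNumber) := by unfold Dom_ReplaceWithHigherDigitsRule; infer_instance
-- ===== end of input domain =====

-- B replaces A's index-by-index trigger scan with one str.find per pattern and a minimum over the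
-- found start positions (objective: idiomatic; a timing run measured B faster).

-- ===== PORT A =====
-- A's loop body, one index i: first the pair check (three ifs with break), then the quintuple
-- check, then the 'last index' check; 'some out' = Python's break with OutputNumber = out.
-- In-range indexing InputNumber[i-k] is ported as getD (the guards keep every index in range);
-- the slices InputNumber[:j] / InputNumber[j:] with 0 ≤ j are exactly take / drop.
def pvStepL (cs : List Char) (i : Nat) : Option (List Char) :=
  if i = cs.length - 1 then some cs else none

def pvStepQ (cs : List Char) (i : Nat) : Option (List Char) :=
  if 4 ≤ i ∧ cs.getD i ' ' = cs.getD (i-1) ' ' ∧ cs.getD (i-1) ' ' = cs.getD (i-2) ' '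
       ∧ cs.getD (i-2) ' ' = cs.getD (i-3) ' ' ∧ cs.getD (i-3) ' ' = cs.getD (i-4) ' ' then
    if cs.getD i ' ' = 'I' then some (cs.take (i-4) ++ 'V' :: cs.drop (i+1))
    else if cs.getD i ' ' = 'X' then some (cs.take (i-4) ++ 'L' :: cs.drop (i+1))
    else if cs.getD i ' ' = 'C' then some (cs.take (i-4) ++ 'D' :: cs.drop (i+1))
    else pvStepL cs i
  else pvStepL cs i

def pvStep (cs : List Char) (i : Nat) : Option (List Char) :=
  if 1 ≤ i ∧ cs.getD i ' ' = cs.getD (i-1) ' ' then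
    if cs.getD i ' ' = 'V' then some (cs.take (i-1) ++ 'X' :: cs.drop (i+1))
    else if cs.getD i ' ' = 'L' then some (cs.take (i-1) ++ 'C' :: cs.drop (i+1))
    else if cs.getD i ' ' = 'D' then some (cs.take (i-1) ++ 'M' :: cs.drop (i+1))
    else pvStepQ cs i
  else pvStepQ cs i

-- 'for i in range(len(InputNumber))', breaking as soon as a step assigns OutputNumber.
-- Falling off the loop without a break means Python raises UnboundLocalError (only the empty
-- string reaches that; excluded by Pre_): the port returns [] there.
def pvLoopA (cs : List Char) (i : Nat) : List Char :=
  if _h : i < cs.length then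
    match pvStep cs i with
    | some out => out
    | none => pvLoopA cs (i+1)
  else []
termination_by cs.length - i

def ReplaceWithHigherDigitsRule (InputNumber : String) : String :=
  String.ofList (pvLoopA InputNumber.toList 0)

-- ===== PORT B =====
def pvPats : List (List Char × Char) :=
  [(['V','V'],'X'), (['L','L'],'C'), (['D','D'],'M'),
   (['I','I','I','I','I'],'V'), (['X','X','X','X','X'],'L'), (['C','C','C','C','C'],'D')]

-- one iteration of B's 'for pat, rep in …' loop: p = InputNumber.find(pat);
-- 'if p >= 0 and (best is None or p < best[0]): best = (p, pat, rep)'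
def pvBStep (cs : List Char) (best : Option (Int × List Char × Char)) (pr : List Char × Char) :
    Option (Int × List Char × Char) :=
  let p := PySem.Chars.find cs pr.1
  if 0 ≤ p then
    match best with
    | none => some (p, pr.1, pr.2)
    | some b => if p < b.1 then some (p, pr.1, pr.2) else some b
  else best

-- InputNumber[:p] + rep + InputNumber[p+len(pat):] with p ≥ 0 is take/‘::’/drop (p.toNat is exact
-- because the kept best always has 0 ≤ p).
def ReplaceWithHigherDigitsRule_alt (InputNumber : String) : String :=
  match pvPats.foldl (pvBStep InputNumber.toList) none with
  | none => InputNumber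
  | some (p, pat, rep) =>
      String.ofList (InputNumber.toList.take p.toNat
        ++ rep :: InputNumber.toList.drop (p.toNat + pat.length))

-- ===== PRECONDITION & SPEC =====
-- Pre_ excludes only the empty string, on which A's loop never runs and the final
-- return statement raises UnboundLocalError.
def Pre_ReplaceWithHigherDigitsRule (InputNumber : String) : Prop := InputNumber ≠ ""
instance (InputNumber : String) : Decidable (Pre_ReplaceWithHigherDigitsRule InputNumber) := by
  unfold Pre_ReplaceWithHigherDigitsRule; infer_instance

def pvWitness_ReplaceWithHigherDigitsRule : String := "XIIIIIX"

def Spec_ReplaceWithHigherDigitsRule (InputNumber : String) (out : String) : Prop :=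
  out = ReplaceWithHigherDigitsRule_alt InputNumber
instance (InputNumber : String) (out : String) : Decidable (Spec_ReplaceWithHigherDigitsRule InputNumber out) := by
  unfold Spec_ReplaceWithHigherDigitsRule; infer_instance

-- ===== CLAIM (what is proved, stated in full; the proofs are below) =====
def Claim_equal_ReplaceWithHigherDigitsRule : Prop :=
  ∀ (InputNumber : String), Dom_ReplaceWithHigherDigitsRule InputNumber →
    Pre_ReplaceWithHigherDigitsRule InputNumber →
    Spec_ReplaceWithHigherDigitsRule InputNumber (ReplaceWithHigherDigitsRule InputNumber)

-- ===== LEMMAS AND PROOFS =====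

-- B's fold, on the list level, and the result it rewrites to.
def pvF (cs : List Char) : Option (Int × List Char × Char) := pvPats.foldl (pvBStep cs) none

def pvBuild (cs : List Char) : List Char :=
  match pvF cs with
  | none => cs
  | some (p, pat, rep) => cs.take p.toNat ++ rep :: cs.drop (p.toNat + pat.length)

def pvNoPre (cs : List Char) : Prop := ∀ pr ∈ pvPats, ¬ pr.1 <+: cs

-- ---- facts about PySem.Chars.find ----

theorem pv_find_eq_coe (cs pat : List Char) (j : Nat) (hpre : pat <+: cs.drop j)
    (hmin : ∀ i, i < j → ¬ pat <+: cs.drop i) : PySem.Chars.find cs pat = (j : Int) := by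
  have hin : pat <:+: cs := (List.IsPrefix.isInfix hpre).trans (List.drop_suffix j cs).isInfix
  have h0 : 0 ≤ PySem.Chars.find cs pat := (PySem.Chars.find_nonneg_iff cs pat).2 hin
  obtain ⟨hp, hm⟩ := PySem.Chars.find_spec h0
  rcases lt_trichotomy (PySem.Chars.find cs pat).toNat j with hlt | heq | hgt
  · exact absurd hp (hmin _ hlt)
  · omega
  · exact absurd hpre (hm j hgt)

theorem pv_find_eq_zero_iff (cs pat : List Char) :
    PySem.Chars.find cs pat = 0 ↔ pat <+: cs := by
  constructor
  · intro h
    have h0 : 0 ≤ PySem.Chars.find cs pat := by omega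
    have := (PySem.Chars.find_spec h0).1
    rw [h] at this
    simpa using this
  · intro h
    exact pv_find_eq_coe cs pat 0 (by simpa using h) (by omega)

theorem pv_find_cons_of_not_prefix (c : Char) (cs pat : List Char) (h : ¬ pat <+: (c :: cs)) :
    PySem.Chars.find (c :: cs) pat =
      (if PySem.Chars.find cs pat = -1 then -1 else PySem.Chars.find cs pat + 1) := by
  by_cases hq : PySem.Chars.find cs pat = -1
  · rw [if_pos hq]
    rw [PySem.Chars.find_eq_neg_one_iff] at hq ⊢
    intro hin
    rcases List.infix_cons_iff.1 hin with hp | hi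
    · exact h hp
    · exact hq hi
  · rw [if_neg hq]
    have h0 : 0 ≤ PySem.Chars.find cs pat := by
      have := PySem.Chars.neg_one_le_find cs pat
      omega
    obtain ⟨hp, hm⟩ := PySem.Chars.find_spec h0
    have := pv_find_eq_coe (c :: cs) pat ((PySem.Chars.find cs pat).toNat + 1)
      (by simpa [List.drop_succ_cons] using hp)
      (by
        intro i hi
        match i with
        | 0 => simpa using h
        | Nat.succ m =>
            simp only [List.drop_succ_cons]
            exact hm m (by omega))
    rw [this]
    omega

-- ---- B side: shifting the fold through a cons ----

def pvShift : Option (Int × List Char × Char) → Option (Int × List Char × Char)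
  | none => none
  | some (p, pat, rep) => some (p + 1, pat, rep)

theorem pvBStep_shift (c : Char) (cs : List Char) (pr : List Char × Char)
    (h : ¬ pr.1 <+: (c :: cs)) (b : Option (Int × List Char × Char)) :
    pvBStep (c :: cs) (pvShift b) pr = pvShift (pvBStep cs b pr) := by
  have hrw := pv_find_cons_of_not_prefix c cs pr.1 h
  by_cases hq : PySem.Chars.find cs pr.1 = -1
  · cases b with
    | none => simp [pvBStep, hrw, hq, pvShift]
    | some bb => rcases bb with ⟨bp, bpat, brep⟩; simp [pvBStep, hrw, hq, pvShift]
  · have h0 : 0 ≤ PySem.Chars.find cs pr.1 := by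
      have := PySem.Chars.neg_one_le_find cs pr.1
      omega
    have h1 : (0 : Int) ≤ PySem.Chars.find cs pr.1 + 1 := by omega
    cases b with
    | none => simp [pvBStep, hrw, hq, h0, h1, pvShift]
    | some bb =>
        rcases bb with ⟨bp, bpat, brep⟩
        by_cases hc : PySem.Chars.find cs pr.1 < bp
        · simp [pvBStep, hrw, hq, h0, h1, pvShift, hc, show PySem.Chars.find cs pr.1 + 1 < bp + 1 by omega]
        · simp [pvBStep, hrw, hq, h0, h1, pvShift, hc, show ¬ (PySem.Chars.find cs pr.1 + 1 < bp + 1) by omega]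

theorem pvF_shift (c : Char) (cs : List Char) (h : pvNoPre (c :: cs)) :
    pvF (c :: cs) = pvShift (pvF cs) := by
  have aux : ∀ (l : List (List Char × Char)), (∀ pr ∈ l, ¬ pr.1 <+: (c :: cs)) →
      ∀ b, l.foldl (pvBStep (c :: cs)) (pvShift b) = pvShift (l.foldl (pvBStep cs) b) := by
    intro l
    induction l with
    | nil => intro _ b; rfl
    | cons pr l ih =>
        intro hl b
        simp only [List.foldl_cons]
        rw [pvBStep_shift c cs pr (hl pr (by simp)) b]
        exact ih (fun q hq => hl q (by simp [hq])) _
  exact aux pvPats h none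

theorem pvF_nonneg (cs : List Char) (p : Int) (pat : List Char) (rep : Char)
    (h : pvF cs = some (p, pat, rep)) : 0 ≤ p := by
  have aux : ∀ (l : List (List Char × Char)) (b : Option (Int × List Char × Char)),
      (∀ q qpat qrep, b = some (q, qpat, qrep) → 0 ≤ q) →
      ∀ q qpat qrep, l.foldl (pvBStep cs) b = some (q, qpat, qrep) → 0 ≤ q := by
    intro l
    induction l with
    | nil => intro b hb q qpat qrep hq; exact hb q qpat qrep hq
    | cons pr l ih =>
        intro b hb
        simp only [List.foldl_cons]
        apply ih
        intro q qpat qrep hq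
        cases b with
        | none =>
            simp only [pvBStep] at hq
            by_cases h0 : 0 ≤ PySem.Chars.find cs pr.1
            · rw [if_pos h0] at hq
              simp only [Option.some.injEq, Prod.mk.injEq] at hq
              omega
            · rw [if_neg h0] at hq
              exact absurd hq (by simp)
        | some bb =>
            rcases bb with ⟨bp, bpat, brep⟩
            simp only [pvBStep] at hq
            by_cases h0 : 0 ≤ PySem.Chars.find cs pr.1
            · rw [if_pos h0] at hq
              by_cases hc : PySem.Chars.find cs pr.1 < bp
              · rw [if_pos hc] at hq
                simp only [Option.some.injEq, Prod.mk.injEq] at hq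
                omega
              · rw [if_neg hc] at hq
                exact hb q qpat qrep hq
            · rw [if_neg h0] at hq
              exact hb q qpat qrep hq
  exact aux pvPats none (by simp) p pat rep h

-- ---- B side: when a pattern is a prefix ----

theorem pv_foldl_absorb (cs : List Char) (pat : List Char) (rep : Char) (l : List (List Char × Char)) :
    l.foldl (pvBStep cs) (some (0, pat, rep)) = some (0, pat, rep) := by
  induction l with
  | nil => rfl
  | cons pr l ih =>
      simp only [List.foldl_cons]
      have hstep : pvBStep cs (some (0, pat, rep)) pr = some (0, pat, rep) := by
        simp only [pvBStep]
        split_ifs with h0 hc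
        · omega
        · rfl
        · rfl
      rw [hstep, ih]

def pvPosInv (b : Option (Int × List Char × Char)) : Prop :=
  b = none ∨ ∃ p pat rep, b = some (p, pat, rep) ∧ 0 < p

theorem pv_foldl_posInv (cs : List Char) (l : List (List Char × Char)) (b : Option (Int × List Char × Char))
    (hl : ∀ pr ∈ l, ¬ pr.1 <+: cs) (hb : pvPosInv b) : pvPosInv (l.foldl (pvBStep cs) b) := by
  induction l generalizing b with
  | nil => exact hb
  | cons pr l ih =>
      simp only [List.foldl_cons]
      apply ih _ (fun q hq => hl q (List.mem_cons_of_mem pr hq))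
      have hz : PySem.Chars.find cs pr.1 ≠ 0 := by
        intro h0
        exact hl pr (List.mem_cons_self) ((pv_find_eq_zero_iff cs pr.1).1 h0)
      cases b with
      | none =>
          simp only [pvBStep]
          by_cases h0 : 0 ≤ PySem.Chars.find cs pr.1
          · rw [if_pos h0]
            exact Or.inr ⟨_, _, _, rfl, by omega⟩
          · rw [if_neg h0]
            exact hb
      | some bb =>
          rcases bb with ⟨bp, bpat, brep⟩
          simp only [pvBStep]
          by_cases h0 : 0 ≤ PySem.Chars.find cs pr.1
          · rw [if_pos h0]
            by_cases hc : PySem.Chars.find cs pr.1 < bp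
            · rw [if_pos hc]
              exact Or.inr ⟨_, _, _, rfl, by omega⟩
            · rw [if_neg hc]
              exact hb
          · rw [if_neg h0]
            exact hb

theorem pvF_of_prefix (cs : List Char) (l1 l2 : List (List Char × Char)) (pk : List Char × Char)
    (hsplit : pvPats = l1 ++ pk :: l2) (hpre : pk.1 <+: cs)
    (hl1 : ∀ pr ∈ l1, ¬ pr.1 <+: cs) :
    pvF cs = some (0, pk.1, pk.2) := by
  have hfind : PySem.Chars.find cs pk.1 = 0 := (pv_find_eq_zero_iff cs pk.1).2 hpre
  unfold pvF
  rw [hsplit, List.foldl_append]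
  have hinv : pvPosInv (l1.foldl (pvBStep cs) none) :=
    pv_foldl_posInv cs l1 none hl1 (Or.inl rfl)
  simp only [List.foldl_cons]
  have hstep : pvBStep cs (l1.foldl (pvBStep cs) none) pk = some (0, pk.1, pk.2) := by
    rcases hinv with hn | ⟨p, pat, rep, hs, hp⟩
    · rw [hn]
      simp [pvBStep, hfind]
    · rw [hs]
      simp only [pvBStep, hfind]
      rw [if_pos (by omega : (0:Int) ≤ 0), if_pos (by omega : (0:Int) < p)]
  rw [hstep]
  exact pv_foldl_absorb cs pk.1 pk.2 l2

-- ---- A side: shifting the loop through a cons ----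

theorem pv_foldl_keep (cs : List Char) (l : List (List Char × Char)) (b : Option (Int × List Char × Char))
    (h : ∀ pr ∈ l, PySem.Chars.find cs pr.1 = -1) : l.foldl (pvBStep cs) b = b := by
  induction l generalizing b with
  | nil => rfl
  | cons pr l ih =>
      simp only [List.foldl_cons]
      have hstep : pvBStep cs b pr = b := by
        simp only [pvBStep, h pr List.mem_cons_self]
        rw [if_neg (by omega)]
      rw [hstep]
      exact ih _ (fun q hq => h q (List.mem_cons_of_mem pr hq))

theorem pvStepL_shift (c : Char) (cs : List Char) (j : Nat) (h2 : j + 1 ≤ cs.length) :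
    pvStepL (c :: cs) (j + 1) = Option.map (c :: ·) (pvStepL cs j) := by
  unfold pvStepL
  by_cases h : j + 1 = cs.length
  · rw [if_pos (by simp [List.length_cons]; omega), if_pos (by omega)]
    rfl
  · rw [if_neg (by simp [List.length_cons]; omega), if_neg (by omega)]
    rfl

theorem pvStepQ_shift (c : Char) (cs : List Char) (j : Nat) (hnp : pvNoPre (c :: cs))
    (h2 : j + 1 ≤ cs.length) :
    pvStepQ (c :: cs) (j + 1) = Option.map (c :: ·) (pvStepQ cs j) := by
  rcases Nat.lt_or_ge j 3 with hj | hj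
  · -- j ≤ 2 : both quintuple guards are false
    unfold pvStepQ
    rw [if_neg (by rintro ⟨h4, -⟩; omega), if_neg (by rintro ⟨h4, -⟩; omega)]
    exact pvStepL_shift c cs j h2
  rcases Nat.eq_or_lt_of_le hj with hj3 | hj4
  · -- j = 3 : the left guard looks at positions 4..0, i.e. a run of five from the head
    subst hj3
    have h4 : 4 ≤ cs.length := h2
    obtain ⟨a0, a1, a2, a3, t, rfl⟩ : ∃ a0 a1 a2 a3 t, cs = a0 :: a1 :: a2 :: a3 :: t := by
      rcases cs with _ | ⟨a0, _ | ⟨a1, _ | ⟨a2, _ | ⟨a3, t⟩⟩⟩⟩ <;>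
        first
          | exact ⟨_, _, _, _, _, rfl⟩
          | (exfalso; simp at h4)
    unfold pvStepQ
    have g0 : (c :: a0 :: a1 :: a2 :: a3 :: t).getD (3+1) ' ' = a3 := rfl
    have g1 : (c :: a0 :: a1 :: a2 :: a3 :: t).getD (3+1-1) ' ' = a2 := rfl
    have g2 : (c :: a0 :: a1 :: a2 :: a3 :: t).getD (3+1-2) ' ' = a1 := rfl
    have g3 : (c :: a0 :: a1 :: a2 :: a3 :: t).getD (3+1-3) ' ' = a0 := rfl
    have g4 : (c :: a0 :: a1 :: a2 :: a3 :: t).getD (3+1-4) ' ' = c := rfl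
    rw [g0, g1, g2, g3, g4]
    by_cases hch : a3 = a2 ∧ a2 = a1 ∧ a1 = a0 ∧ a0 = c
    · by_cases hI : a3 = 'I'
      · exfalso
        have b2 : a2 = 'I' := hch.1 ▸ hI
        have b1 : a1 = 'I' := hch.2.1 ▸ b2
        have b0 : a0 = 'I' := hch.2.2.1 ▸ b1
        have bc : c = 'I' := hch.2.2.2 ▸ b0
        exact hnp (['I','I','I','I','I'], 'V') (by simp [pvPats])
          ⟨t, by simp [bc, b0, b1, b2, hI]⟩
      by_cases hX : a3 = 'X'
      · exfalso
        have b2 : a2 = 'X' := hch.1 ▸ hX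
        have b1 : a1 = 'X' := hch.2.1 ▸ b2
        have b0 : a0 = 'X' := hch.2.2.1 ▸ b1
        have bc : c = 'X' := hch.2.2.2 ▸ b0
        exact hnp (['X','X','X','X','X'], 'L') (by simp [pvPats])
          ⟨t, by simp [bc, b0, b1, b2, hX]⟩
      by_cases hC : a3 = 'C'
      · exfalso
        have b2 : a2 = 'C' := hch.1 ▸ hC
        have b1 : a1 = 'C' := hch.2.1 ▸ b2
        have b0 : a0 = 'C' := hch.2.2.1 ▸ b1
        have bc : c = 'C' := hch.2.2.2 ▸ b0
        exact hnp (['C','C','C','C','C'], 'D') (by simp [pvPats])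
          ⟨t, by simp [bc, b0, b1, b2, hC]⟩
      -- a run of five, but not a collapsible character: fall through to the last-index check
      rw [if_pos (And.intro (by omega : 4 ≤ 3 + 1) hch)]
      rw [if_neg hI, if_neg hX, if_neg hC]
      rw [if_neg (by rintro ⟨h4', -⟩; omega)]
      exact pvStepL_shift c _ 3 h2
    · rw [if_neg (fun h => hch h.2), if_neg (by rintro ⟨h4', -⟩; omega)]
      exact pvStepL_shift c _ 3 h2
  · -- j ≥ 4 : both guards are live and look at the same five characters of cs
    obtain ⟨m, rfl⟩ : ∃ m, j = m + 4 := ⟨j - 4, by omega⟩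
    have g0 : (c :: cs).getD (m + 4 + 1) ' ' = cs.getD (m + 4) ' ' := by simp
    have g1 : (c :: cs).getD (m + 4 + 1 - 1) ' ' = cs.getD (m + 4 - 1) ' ' := by
      rw [show m + 4 + 1 - 1 = (m + 3) + 1 from by omega, show m + 4 - 1 = m + 3 from by omega]
      simp
    have g2 : (c :: cs).getD (m + 4 + 1 - 2) ' ' = cs.getD (m + 4 - 2) ' ' := by
      rw [show m + 4 + 1 - 2 = (m + 2) + 1 from by omega, show m + 4 - 2 = m + 2 from by omega]
      simp
    have g3 : (c :: cs).getD (m + 4 + 1 - 3) ' ' = cs.getD (m + 4 - 3) ' ' := by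
      rw [show m + 4 + 1 - 3 = (m + 1) + 1 from by omega, show m + 4 - 3 = m + 1 from by omega]
      simp
    have g4 : (c :: cs).getD (m + 4 + 1 - 4) ' ' = cs.getD (m + 4 - 4) ' ' := by
      rw [show m + 4 + 1 - 4 = m + 1 from by omega, show m + 4 - 4 = m from by omega]
      simp
    have htk : (c :: cs).take (m + 4 + 1 - 4) = c :: cs.take (m + 4 - 4) := by
      rw [show m + 4 + 1 - 4 = (m + 4 - 4) + 1 from by omega]
      rfl
    have hdr : (c :: cs).drop (m + 4 + 1 + 1) = cs.drop (m + 4 + 1) := rfl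
    unfold pvStepQ
    rw [g0, g1, g2, g3, g4, htk, hdr]
    by_cases hch : cs.getD (m+4) ' ' = cs.getD (m+4-1) ' ' ∧ cs.getD (m+4-1) ' ' = cs.getD (m+4-2) ' '
        ∧ cs.getD (m+4-2) ' ' = cs.getD (m+4-3) ' ' ∧ cs.getD (m+4-3) ' ' = cs.getD (m+4-4) ' '
    · rw [if_pos (And.intro (by omega : 4 ≤ m + 4 + 1) hch),
          if_pos (And.intro (by omega : 4 ≤ m + 4) hch)]
      by_cases hI : cs.getD (m+4) ' ' = 'I'
      · rw [if_pos hI, if_pos hI]; simp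
      rw [if_neg hI, if_neg hI]
      by_cases hX : cs.getD (m+4) ' ' = 'X'
      · rw [if_pos hX, if_pos hX]; simp
      rw [if_neg hX, if_neg hX]
      by_cases hC : cs.getD (m+4) ' ' = 'C'
      · rw [if_pos hC, if_pos hC]; simp
      rw [if_neg hC, if_neg hC]
      exact pvStepL_shift c cs (m + 4) h2
    · rw [if_neg (fun h => hch h.2), if_neg (fun h => hch h.2)]
      exact pvStepL_shift c cs (m + 4) h2

theorem pvStep_none_ne_last (cs : List Char) (i : Nat) (h : pvStep cs i = none) :
    i ≠ cs.length - 1 := by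
  intro he
  unfold pvStep pvStepQ pvStepL at h
  split_ifs at h

theorem pvStep_zero (cs : List Char) (h : 2 ≤ cs.length) : pvStep cs 0 = none := by
  unfold pvStep pvStepQ pvStepL
  rw [if_neg (by rintro ⟨h1, -⟩; omega), if_neg (by rintro ⟨h4, -⟩; omega), if_neg (by omega)]

theorem pvStep_run (cs : List Char) (i : Nat) (hi : 1 ≤ i) (hq : i < 4)
    (hl : i ≠ cs.length - 1) (hpair : cs.getD i ' ' = cs.getD (i-1) ' ')
    (hV : cs.getD i ' ' ≠ 'V') (hL : cs.getD i ' ' ≠ 'L') (hD : cs.getD i ' ' ≠ 'D') :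
    pvStep cs i = none := by
  unfold pvStep pvStepQ pvStepL
  rw [if_pos (And.intro hi hpair), if_neg hV, if_neg hL, if_neg hD,
      if_neg (by rintro ⟨h4, -⟩; omega), if_neg hl]

theorem pv_not_pre_of_head (a b : Char) (p cs' : List Char) (hne : a ≠ b) :
    ¬ (a :: p) <+: (b :: cs') := by
  rintro ⟨s, hs⟩
  simp only [List.cons_append, List.cons.injEq] at hs
  exact hne hs.1


theorem pvStep_shift (c : Char) (cs : List Char) (i : Nat) (hnp : pvNoPre (c :: cs))
    (h1 : 1 ≤ i) (h2 : i ≤ cs.length) :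
    pvStep (c :: cs) i = Option.map (c :: ·) (pvStep cs (i - 1)) := by
  obtain ⟨j, rfl⟩ : ∃ j, i = j + 1 := ⟨i - 1, by omega⟩
  simp only [Nat.add_sub_cancel]
  have h2' : j + 1 ≤ cs.length := h2
  rcases Nat.eq_zero_or_pos j with rfl | hj
  · -- i = 1 : on cs the pair guard 1 ≤ 0 is dead
    have hcs : 1 ≤ cs.length := h2'
    obtain ⟨a, t, rfl⟩ : ∃ a t, cs = a :: t := by
      rcases cs with _ | ⟨a, t⟩
      · exfalso; simp at hcs
      · exact ⟨a, t, rfl⟩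
    unfold pvStep
    rw [if_neg (by
          rintro ⟨h1', -⟩
          omega : ¬ (1 ≤ 0 ∧ (a :: t).getD 0 ' ' = (a :: t).getD (0 - 1) ' '))]
    have g0 : (c :: a :: t).getD (0+1) ' ' = a := rfl
    have g1 : (c :: a :: t).getD (0+1-1) ' ' = c := rfl
    rw [g0, g1]
    by_cases hg : a = c
    · rw [if_pos (And.intro (by omega : 1 ≤ 0 + 1) hg)]
      by_cases hV : a = 'V'
      · exfalso
        have bc : c = 'V' := hg ▸ hV
        exact hnp (['V','V'], 'X') (by simp [pvPats]) ⟨t, by simp [bc, hV]⟩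
      by_cases hL : a = 'L'
      · exfalso
        have bc : c = 'L' := hg ▸ hL
        exact hnp (['L','L'], 'C') (by simp [pvPats]) ⟨t, by simp [bc, hL]⟩
      by_cases hD : a = 'D'
      · exfalso
        have bc : c = 'D' := hg ▸ hD
        exact hnp (['D','D'], 'M') (by simp [pvPats]) ⟨t, by simp [bc, hD]⟩
      rw [if_neg hV, if_neg hL, if_neg hD]
      exact pvStepQ_shift c (a :: t) 0 hnp h2'
    · rw [if_neg (fun hh => hg hh.2)]
      exact pvStepQ_shift c (a :: t) 0 hnp h2'
  · -- i ≥ 2 : both pair guards are live and compare the same two characters of cs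
    obtain ⟨k, rfl⟩ : ∃ k, j = k + 1 := ⟨j - 1, by omega⟩
    unfold pvStep
    have g0 : (c :: cs).getD (k+1+1) ' ' = cs.getD (k+1) ' ' := by simp
    have g1 : (c :: cs).getD (k+1+1-1) ' ' = cs.getD (k+1-1) ' ' := by
      rw [show k+1+1-1 = k+1 from by omega, show k+1-1 = k from by omega]
      simp
    rw [g0, g1]
    by_cases hg : cs.getD (k+1) ' ' = cs.getD (k+1-1) ' '
    · rw [if_pos (And.intro (by omega : 1 ≤ k+1+1) hg),
          if_pos (And.intro (by omega : 1 ≤ k+1) hg)]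
      have htk : (c :: cs).take (k+1+1-1) = c :: cs.take (k+1-1) := by
        rw [show k+1+1-1 = (k+1-1)+1 from by omega]
        rfl
      have hdr : (c :: cs).drop (k+1+1+1) = cs.drop (k+1+1) := rfl
      rw [htk, hdr]
      by_cases hV : cs.getD (k+1) ' ' = 'V'
      · rw [if_pos hV, if_pos hV]; simp
      rw [if_neg hV, if_neg hV]
      by_cases hL : cs.getD (k+1) ' ' = 'L'
      · rw [if_pos hL, if_pos hL]; simp
      rw [if_neg hL, if_neg hL]
      by_cases hD : cs.getD (k+1) ' ' = 'D'
      · rw [if_pos hD, if_pos hD]; simp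
      rw [if_neg hD, if_neg hD]
      exact pvStepQ_shift c cs (k+1) hnp h2'
    · rw [if_neg (fun hh => hg hh.2), if_neg (fun hh => hg hh.2)]
      exact pvStepQ_shift c cs (k+1) hnp h2' 

theorem pvLoopA_shift (c : Char) (cs : List Char) (hnp : pvNoPre (c :: cs)) :
    ∀ i, 1 ≤ i → i ≤ cs.length → pvLoopA (c :: cs) i = c :: pvLoopA cs (i - 1) := by
  suffices H : ∀ k i, cs.length - i = k → 1 ≤ i → i ≤ cs.length →
      pvLoopA (c :: cs) i = c :: pvLoopA cs (i - 1) from fun i h1 h2 => H _ i rfl h1 h2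
  intro k
  induction k with
  | zero =>
      intro i hk h1 h2
      cases hstep : pvStep cs (i - 1) with
      | none =>
          exact absurd (pvStep_none_ne_last cs (i-1) hstep) (by simp only [ne_eq, not_not]; omega)
      | some out =>
          have hL : pvLoopA (c :: cs) i = c :: out := by
            rw [pvLoopA, dif_pos (by simp only [List.length_cons]; omega),
                pvStep_shift c cs i hnp h1 h2, hstep]
            rfl
          have hR : pvLoopA cs (i - 1) = out := by
            rw [pvLoopA, dif_pos (by omega : i - 1 < cs.length), hstep]
          rw [hL, hR]
  | succ k ihk =>
      intro i hk h1 h2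
      cases hstep : pvStep cs (i - 1) with
      | some out =>
          have hL : pvLoopA (c :: cs) i = c :: out := by
            rw [pvLoopA, dif_pos (by simp only [List.length_cons]; omega),
                pvStep_shift c cs i hnp h1 h2, hstep]
            rfl
          have hR : pvLoopA cs (i - 1) = out := by
            rw [pvLoopA, dif_pos (by omega : i - 1 < cs.length), hstep]
          rw [hL, hR]
      | none =>
          have hne := pvStep_none_ne_last cs (i-1) hstep
          have h2' : i + 1 ≤ cs.length := by omega
          have hL : pvLoopA (c :: cs) i = pvLoopA (c :: cs) (i + 1) := by
            rw [pvLoopA, dif_pos (by simp only [List.length_cons]; omega),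
                pvStep_shift c cs i hnp h1 h2, hstep]
            rfl
          have hR : pvLoopA cs (i - 1) = pvLoopA cs i := by
            rw [pvLoopA, dif_pos (by omega : i - 1 < cs.length), hstep,
                show i - 1 + 1 = i from by omega]
          have hrec := ihk (i+1) (by omega) (by omega) h2'
          simp only [Nat.add_sub_cancel] at hrec
          rw [hL, hrec, hR]

-- ---- main list-level equivalence ----

theorem pv_main (cs : List Char) (h : cs ≠ []) : pvLoopA cs 0 = pvBuild cs := by
  induction cs with
  | nil => exact absurd rfl h
  | cons c rest ih =>
    by_cases hp : ∃ pr ∈ pvPats, pr.1 <+: (c :: rest)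
    · obtain ⟨pr, hmem, hpre⟩ := hp
      simp only [pvPats, List.mem_cons, List.not_mem_nil, or_false] at hmem
      rcases hmem with rfl | rfl | rfl | rfl | rfl | rfl
      · -- "VV" → "X"
        obtain ⟨t, ht⟩ := hpre
        rw [← ht]
        simp only [List.cons_append, List.nil_append]
        have hA : pvLoopA ('V' :: 'V' :: t) 0 = 'X' :: t := by
          rw [pvLoopA, dif_pos (by simp only [List.length_cons]; omega),
              pvStep_zero _ (by simp only [List.length_cons]; omega)]
          rw [pvLoopA, dif_pos (by simp only [List.length_cons]; omega)]
          rw [show pvStep ('V' :: 'V' :: t) 1 = some ('X' :: t) from by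
            unfold pvStep
            rw [show ('V' :: 'V' :: t).getD 1 ' ' = 'V' from rfl,
                show ('V' :: 'V' :: t).getD (1-1) ' ' = 'V' from rfl]
            simp]
        have hF : pvF ('V' :: 'V' :: t) = some (0, ['V','V'], 'X') :=
          pvF_of_prefix _ [] _ (['V','V'],'X') rfl ⟨t, rfl⟩ (by intro q hq; simp at hq)
        rw [hA]
        unfold pvBuild
        rw [hF]
        simp
      · -- "LL" → "C"
        obtain ⟨t, ht⟩ := hpre
        rw [← ht]
        simp only [List.cons_append, List.nil_append]
        have hA : pvLoopA ('L' :: 'L' :: t) 0 = 'C' :: t := by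
          rw [pvLoopA, dif_pos (by simp only [List.length_cons]; omega),
              pvStep_zero _ (by simp only [List.length_cons]; omega)]
          rw [pvLoopA, dif_pos (by simp only [List.length_cons]; omega)]
          rw [show pvStep ('L' :: 'L' :: t) 1 = some ('C' :: t) from by
            unfold pvStep
            rw [show ('L' :: 'L' :: t).getD 1 ' ' = 'L' from rfl,
                show ('L' :: 'L' :: t).getD (1-1) ' ' = 'L' from rfl]
            simp]
        have hF : pvF ('L' :: 'L' :: t) = some (0, ['L','L'], 'C') :=
          pvF_of_prefix _ [(['V','V'],'X')] _ (['L','L'],'C') rfl ⟨t, rfl⟩ (by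
            intro q hq
            simp only [List.mem_cons, List.not_mem_nil, or_false] at hq
            subst hq
            exact pv_not_pre_of_head _ _ _ _ (by decide))
        rw [hA]
        unfold pvBuild
        rw [hF]
        simp
      · -- "DD" → "M"
        obtain ⟨t, ht⟩ := hpre
        rw [← ht]
        simp only [List.cons_append, List.nil_append]
        have hA : pvLoopA ('D' :: 'D' :: t) 0 = 'M' :: t := by
          rw [pvLoopA, dif_pos (by simp only [List.length_cons]; omega),
              pvStep_zero _ (by simp only [List.length_cons]; omega)]
          rw [pvLoopA, dif_pos (by simp only [List.length_cons]; omega)]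
          rw [show pvStep ('D' :: 'D' :: t) 1 = some ('M' :: t) from by
            unfold pvStep
            rw [show ('D' :: 'D' :: t).getD 1 ' ' = 'D' from rfl,
                show ('D' :: 'D' :: t).getD (1-1) ' ' = 'D' from rfl]
            simp]
        have hF : pvF ('D' :: 'D' :: t) = some (0, ['D','D'], 'M') :=
          pvF_of_prefix _ [(['V','V'],'X'), (['L','L'],'C')] _ (['D','D'],'M') rfl ⟨t, rfl⟩ (by
            intro q hq
            simp only [List.mem_cons, List.not_mem_nil, or_false] at hq
            rcases hq with rfl | rfl <;> exact pv_not_pre_of_head _ _ _ _ (by decide))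
        rw [hA]
        unfold pvBuild
        rw [hF]
        simp
      · -- "IIIII" → "V"
        obtain ⟨t, ht⟩ := hpre
        rw [← ht]
        simp only [List.cons_append, List.nil_append]
        have hA : pvLoopA ('I' :: 'I' :: 'I' :: 'I' :: 'I' :: t) 0 = 'V' :: t := by
          rw [pvLoopA, dif_pos (by simp only [List.length_cons]; omega),
              pvStep_zero _ (by simp only [List.length_cons]; omega)]
          rw [pvLoopA, dif_pos (by simp only [List.length_cons]; omega),
              pvStep_run _ 1 (by omega) (by omega) (by simp only [List.length_cons]; omega) rfl
                (by rw [show ('I'::'I'::'I'::'I'::'I'::t).getD 1 ' ' = 'I' from rfl]; decide)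
                (by rw [show ('I'::'I'::'I'::'I'::'I'::t).getD 1 ' ' = 'I' from rfl]; decide)
                (by rw [show ('I'::'I'::'I'::'I'::'I'::t).getD 1 ' ' = 'I' from rfl]; decide)]
          rw [pvLoopA, dif_pos (by simp only [List.length_cons]; omega),
              pvStep_run _ 2 (by omega) (by omega) (by simp only [List.length_cons]; omega) rfl
                (by rw [show ('I'::'I'::'I'::'I'::'I'::t).getD 2 ' ' = 'I' from rfl]; decide)
                (by rw [show ('I'::'I'::'I'::'I'::'I'::t).getD 2 ' ' = 'I' from rfl]; decide)
                (by rw [show ('I'::'I'::'I'::'I'::'I'::t).getD 2 ' ' = 'I' from rfl]; decide)]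
          rw [pvLoopA, dif_pos (by simp only [List.length_cons]; omega),
              pvStep_run _ 3 (by omega) (by omega) (by simp only [List.length_cons]; omega) rfl
                (by rw [show ('I'::'I'::'I'::'I'::'I'::t).getD 3 ' ' = 'I' from rfl]; decide)
                (by rw [show ('I'::'I'::'I'::'I'::'I'::t).getD 3 ' ' = 'I' from rfl]; decide)
                (by rw [show ('I'::'I'::'I'::'I'::'I'::t).getD 3 ' ' = 'I' from rfl]; decide)]
          rw [pvLoopA, dif_pos (by simp only [List.length_cons]; omega)]
          rw [show pvStep ('I'::'I'::'I'::'I'::'I'::t) 4 = some ('V' :: t) from by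
            unfold pvStep pvStepQ
            rw [show ('I'::'I'::'I'::'I'::'I'::t).getD 4 ' ' = 'I' from rfl,
                show ('I'::'I'::'I'::'I'::'I'::t).getD (4-1) ' ' = 'I' from rfl,
                show ('I'::'I'::'I'::'I'::'I'::t).getD (4-2) ' ' = 'I' from rfl,
                show ('I'::'I'::'I'::'I'::'I'::t).getD (4-3) ' ' = 'I' from rfl,
                show ('I'::'I'::'I'::'I'::'I'::t).getD (4-4) ' ' = 'I' from rfl]
            simp]
        have hF : pvF ('I'::'I'::'I'::'I'::'I'::t) = some (0, ['I','I','I','I','I'], 'V') :=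
          pvF_of_prefix _ [(['V','V'],'X'), (['L','L'],'C'), (['D','D'],'M')] _
            (['I','I','I','I','I'],'V') rfl ⟨t, rfl⟩ (by
            intro q hq
            simp only [List.mem_cons, List.not_mem_nil, or_false] at hq
            rcases hq with rfl | rfl | rfl <;> exact pv_not_pre_of_head _ _ _ _ (by decide))
        rw [hA]
        unfold pvBuild
        rw [hF]
        simp
      · -- "XXXXX" → "L"
        obtain ⟨t, ht⟩ := hpre
        rw [← ht]
        simp only [List.cons_append, List.nil_append]
        have hA : pvLoopA ('X' :: 'X' :: 'X' :: 'X' :: 'X' :: t) 0 = 'L' :: t := by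
          rw [pvLoopA, dif_pos (by simp only [List.length_cons]; omega),
              pvStep_zero _ (by simp only [List.length_cons]; omega)]
          rw [pvLoopA, dif_pos (by simp only [List.length_cons]; omega),
              pvStep_run _ 1 (by omega) (by omega) (by simp only [List.length_cons]; omega) rfl
                (by rw [show ('X'::'X'::'X'::'X'::'X'::t).getD 1 ' ' = 'X' from rfl]; decide)
                (by rw [show ('X'::'X'::'X'::'X'::'X'::t).getD 1 ' ' = 'X' from rfl]; decide)
                (by rw [show ('X'::'X'::'X'::'X'::'X'::t).getD 1 ' ' = 'X' from rfl]; decide)]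
          rw [pvLoopA, dif_pos (by simp only [List.length_cons]; omega),
              pvStep_run _ 2 (by omega) (by omega) (by simp only [List.length_cons]; omega) rfl
                (by rw [show ('X'::'X'::'X'::'X'::'X'::t).getD 2 ' ' = 'X' from rfl]; decide)
                (by rw [show ('X'::'X'::'X'::'X'::'X'::t).getD 2 ' ' = 'X' from rfl]; decide)
                (by rw [show ('X'::'X'::'X'::'X'::'X'::t).getD 2 ' ' = 'X' from rfl]; decide)]
          rw [pvLoopA, dif_pos (by simp only [List.length_cons]; omega),
              pvStep_run _ 3 (by omega) (by omega) (by simp only [List.length_cons]; omega) rfl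
                (by rw [show ('X'::'X'::'X'::'X'::'X'::t).getD 3 ' ' = 'X' from rfl]; decide)
                (by rw [show ('X'::'X'::'X'::'X'::'X'::t).getD 3 ' ' = 'X' from rfl]; decide)
                (by rw [show ('X'::'X'::'X'::'X'::'X'::t).getD 3 ' ' = 'X' from rfl]; decide)]
          rw [pvLoopA, dif_pos (by simp only [List.length_cons]; omega)]
          rw [show pvStep ('X'::'X'::'X'::'X'::'X'::t) 4 = some ('L' :: t) from by
            unfold pvStep pvStepQ
            rw [show ('X'::'X'::'X'::'X'::'X'::t).getD 4 ' ' = 'X' from rfl,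
                show ('X'::'X'::'X'::'X'::'X'::t).getD (4-1) ' ' = 'X' from rfl,
                show ('X'::'X'::'X'::'X'::'X'::t).getD (4-2) ' ' = 'X' from rfl,
                show ('X'::'X'::'X'::'X'::'X'::t).getD (4-3) ' ' = 'X' from rfl,
                show ('X'::'X'::'X'::'X'::'X'::t).getD (4-4) ' ' = 'X' from rfl]
            simp]
        have hF : pvF ('X'::'X'::'X'::'X'::'X'::t) = some (0, ['X','X','X','X','X'], 'L') :=
          pvF_of_prefix _ [(['V','V'],'X'), (['L','L'],'C'), (['D','D'],'M'),
              (['I','I','I','I','I'],'V')] _ (['X','X','X','X','X'],'L') rfl ⟨t, rfl⟩ (by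
            intro q hq
            simp only [List.mem_cons, List.not_mem_nil, or_false] at hq
            rcases hq with rfl | rfl | rfl | rfl <;> exact pv_not_pre_of_head _ _ _ _ (by decide))
        rw [hA]
        unfold pvBuild
        rw [hF]
        simp
      · -- "CCCCC" → "D"
        obtain ⟨t, ht⟩ := hpre
        rw [← ht]
        simp only [List.cons_append, List.nil_append]
        have hA : pvLoopA ('C' :: 'C' :: 'C' :: 'C' :: 'C' :: t) 0 = 'D' :: t := by
          rw [pvLoopA, dif_pos (by simp only [List.length_cons]; omega),
              pvStep_zero _ (by simp only [List.length_cons]; omega)]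
          rw [pvLoopA, dif_pos (by simp only [List.length_cons]; omega),
              pvStep_run _ 1 (by omega) (by omega) (by simp only [List.length_cons]; omega) rfl
                (by rw [show ('C'::'C'::'C'::'C'::'C'::t).getD 1 ' ' = 'C' from rfl]; decide)
                (by rw [show ('C'::'C'::'C'::'C'::'C'::t).getD 1 ' ' = 'C' from rfl]; decide)
                (by rw [show ('C'::'C'::'C'::'C'::'C'::t).getD 1 ' ' = 'C' from rfl]; decide)]
          rw [pvLoopA, dif_pos (by simp only [List.length_cons]; omega),
              pvStep_run _ 2 (by omega) (by omega) (by simp only [List.length_cons]; omega) rfl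
                (by rw [show ('C'::'C'::'C'::'C'::'C'::t).getD 2 ' ' = 'C' from rfl]; decide)
                (by rw [show ('C'::'C'::'C'::'C'::'C'::t).getD 2 ' ' = 'C' from rfl]; decide)
                (by rw [show ('C'::'C'::'C'::'C'::'C'::t).getD 2 ' ' = 'C' from rfl]; decide)]
          rw [pvLoopA, dif_pos (by simp only [List.length_cons]; omega),
              pvStep_run _ 3 (by omega) (by omega) (by simp only [List.length_cons]; omega) rfl
                (by rw [show ('C'::'C'::'C'::'C'::'C'::t).getD 3 ' ' = 'C' from rfl]; decide)
                (by rw [show ('C'::'C'::'C'::'C'::'C'::t).getD 3 ' ' = 'C' from rfl]; decide)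
                (by rw [show ('C'::'C'::'C'::'C'::'C'::t).getD 3 ' ' = 'C' from rfl]; decide)]
          rw [pvLoopA, dif_pos (by simp only [List.length_cons]; omega)]
          rw [show pvStep ('C'::'C'::'C'::'C'::'C'::t) 4 = some ('D' :: t) from by
            unfold pvStep pvStepQ
            rw [show ('C'::'C'::'C'::'C'::'C'::t).getD 4 ' ' = 'C' from rfl,
                show ('C'::'C'::'C'::'C'::'C'::t).getD (4-1) ' ' = 'C' from rfl,
                show ('C'::'C'::'C'::'C'::'C'::t).getD (4-2) ' ' = 'C' from rfl,
                show ('C'::'C'::'C'::'C'::'C'::t).getD (4-3) ' ' = 'C' from rfl,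
                show ('C'::'C'::'C'::'C'::'C'::t).getD (4-4) ' ' = 'C' from rfl]
            simp]
        have hF : pvF ('C'::'C'::'C'::'C'::'C'::t) = some (0, ['C','C','C','C','C'], 'D') :=
          pvF_of_prefix _ [(['V','V'],'X'), (['L','L'],'C'), (['D','D'],'M'),
              (['I','I','I','I','I'],'V'), (['X','X','X','X','X'],'L')] _
            (['C','C','C','C','C'],'D') rfl ⟨t, rfl⟩ (by
            intro q hq
            simp only [List.mem_cons, List.not_mem_nil, or_false] at hq
            rcases hq with rfl | rfl | rfl | rfl | rfl <;>
              exact pv_not_pre_of_head _ _ _ _ (by decide))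
        rw [hA]
        unfold pvBuild
        rw [hF]
        simp
    · have hp' : ∀ pr ∈ pvPats, ¬ pr.1 <+: (c :: rest) := fun pr hm hpre => hp ⟨pr, hm, hpre⟩
      rcases eq_or_ne rest [] with rfl | hrest
      · -- a single character: the loop breaks at the last-index check at once
        have hfind : ∀ pr ∈ pvPats, PySem.Chars.find [c] pr.1 = -1 := by
          intro pr hm
          rw [PySem.Chars.find_eq_neg_one_iff]
          intro hin
          have hlen := List.IsInfix.length_le hin
          simp only [pvPats, List.mem_cons, List.not_mem_nil, or_false] at hm
          rcases hm with rfl | rfl | rfl | rfl | rfl | rfl <;> simp at hlen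
        rw [pvLoopA, dif_pos (by simp)]
        unfold pvBuild
        rw [show pvF [c] = none from pv_foldl_keep [c] pvPats none hfind]
        rfl
      · have hlen : 1 ≤ rest.length := by
          rcases rest with _ | ⟨a, t⟩
          · exact absurd rfl hrest
          · simp
        have hA : pvLoopA (c :: rest) 0 = c :: pvLoopA rest 0 := by
          rw [pvLoopA, dif_pos (by simp only [List.length_cons]; omega),
              pvStep_zero _ (by simp only [List.length_cons]; omega)]
          exact pvLoopA_shift c rest hp' 1 (by omega) hlen
        rw [hA, ih hrest]
        unfold pvBuild
        rw [pvF_shift c rest hp']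
        cases hF : pvF rest with
        | none => rfl
        | some b =>
            rcases b with ⟨p, pat, rep⟩
            have hp0 : 0 ≤ p := pvF_nonneg rest p pat rep hF
            simp only [pvShift]
            rw [show (p+1).toNat = p.toNat + 1 from by omega]
            rw [List.take_succ_cons,
                show p.toNat + 1 + pat.length = (p.toNat + pat.length) + 1 from by omega,
                List.drop_succ_cons]
            simp

-- ===== VERDICT (by name: the statement is the Claim_ definition above) =====
theorem ReplaceWithHigherDigitsRule_spec : Claim_equal_ReplaceWithHigherDigitsRule := by
  intro s _hdom hpre
  unfold Spec_ReplaceWithHigherDigitsRule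
  have hne : s.toList ≠ [] := by
    intro h
    exact hpre (by
      have := congrArg String.ofList h
      simpa [String.ofList_toList] using this)
  have hmain := pv_main s.toList hne
  unfold ReplaceWithHigherDigitsRule ReplaceWithHigherDigitsRule_alt
  rw [hmain]
  unfold pvBuild pvF
  cases hF : pvPats.foldl (pvBStep s.toList) none with
  | none => simp [String.ofList_toList]
  | some b => rcases b with ⟨p, pat, rep⟩; rfl
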